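-- pv_equiv track=rewrite | github.com/404kuso/PyBoy | pyboy/plugins/game_wrapper_pokemon_red/utils.py | set_bits
-- ===== SOURCE A (Python) =====
-- def set_bits(value, new_value, index=0):
--     set_bits = list(reversed(bin(new_value).removeprefix('0b')))
--     for i, b in enumerate(list(set_bits)):
--         if int(b) == 1:
--             value |= (1 << index + i)
--         else:
--             value &= ~(1 << index+i)
--     return value
-- ===== SOURCE B (Python) =====
-- def set_bits(value, new_value, index=0):
--     # One masked bitwise expression: clear the nbits-wide window at `index`, then OR the new bits in.
--     nbits = max(new_value.bit_length(), 1)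
--     mask = (1 << nbits) - 1
--     return (value & ~(mask << index)) | (new_value << index)
-- ===== Notes on version B (the rewrite author's own statement) =====
-- stated objective: simpler
-- what changed: Replaces the per-bit loop over the reversed binary string (string formatting, enumerate, one OR/AND-NOT per bit) with a single closed-form masked bitwise expression that clears the window and ORs the new bits in at once.
import Mathlib
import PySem

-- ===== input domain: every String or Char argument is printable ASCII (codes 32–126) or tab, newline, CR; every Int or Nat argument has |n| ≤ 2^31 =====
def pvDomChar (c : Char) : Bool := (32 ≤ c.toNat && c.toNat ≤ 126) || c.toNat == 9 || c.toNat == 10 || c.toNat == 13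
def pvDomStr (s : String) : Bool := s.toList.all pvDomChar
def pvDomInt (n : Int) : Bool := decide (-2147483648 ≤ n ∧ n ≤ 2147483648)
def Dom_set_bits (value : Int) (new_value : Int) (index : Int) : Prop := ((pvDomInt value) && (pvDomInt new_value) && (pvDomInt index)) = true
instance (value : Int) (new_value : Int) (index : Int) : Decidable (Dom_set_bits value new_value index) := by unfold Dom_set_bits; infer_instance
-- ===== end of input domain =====

-- B changes the per-bit loop of A into one closed-form masked bitwise write (simpler); equivalence is proved for
-- new_value ≥ 0 and index ≥ 0 (elsewhere Python A raises ValueError).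

-- ===== PORT A =====
-- helper: LSB-first binary digits of n, exactly list(reversed(bin(n).removeprefix('0b'))) for n > 0
def pyBinRev (n : Nat) : List Nat :=
  if h : n = 0 then [] else n % 2 :: pyBinRev (n / 2)
decreasing_by exact Nat.div_lt_self (Nat.pos_of_ne_zero h) one_lt_two

def set_bits (value : Int) (new_value : Int) (index : Int) : Int :=
  -- list(reversed(bin(new_value).removeprefix('0b'))): for 0 this is ['0'], else the LSB-first digits
  let bits : List Nat := if new_value = 0 then [0] else pyBinRev new_value.toNat
  (PySem.List.enumerate bits).foldl
    (fun v p =>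
      if p.2 = 1 then PySem.Int.bor v ((1 : Int) <<< (index + p.1).toNat)
      else PySem.Int.band v (Int.not ((1 : Int) <<< (index + p.1).toNat)))
    value

-- ===== PORT B =====
def set_bits_alt (value : Int) (new_value : Int) (index : Int) : Int :=
  let nbits : Nat := max (PySem.Int.bitLength new_value) 1
  let mask : Int := (1 : Int) <<< nbits - 1
  PySem.Int.bor (PySem.Int.band value (Int.not (mask <<< index.toNat))) (new_value <<< index.toNat)

-- ===== PRECONDITION & SPEC =====
-- Python A raises ValueError when new_value < 0 (int('-') on the sign char) or index < 0 (negative shift count);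
-- Pre_ excludes exactly those inputs.
def Pre_set_bits (value : Int) (new_value : Int) (index : Int) : Prop :=
  0 ≤ new_value ∧ 0 ≤ index
instance (value : Int) (new_value : Int) (index : Int) : Decidable (Pre_set_bits value new_value index) := by
  unfold Pre_set_bits; infer_instance

def pvWitness_set_bits : Int × Int × Int := (5, 3, 2)

def Spec_set_bits (value : Int) (new_value : Int) (index : Int) (out : Int) : Prop :=
  out = set_bits_alt value new_value index
instance (value : Int) (new_value : Int) (index : Int) (out : Int) : Decidable (Spec_set_bits value new_value index out) := by
  unfold Spec_set_bits; infer_instance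

-- ===== CLAIM (what is proved, stated in full; the proofs are below) =====
def Claim_equal_set_bits : Prop := ∀ (value : Int) (new_value : Int) (index : Int), Dom_set_bits value new_value index → Pre_set_bits value new_value index → Spec_set_bits value new_value index (set_bits value new_value index)

-- ===== LEMMAS AND PROOFS =====

-- the value of a LSB-first digit list
def pvInt2 : List Nat → Int
  | [] => 0
  | d :: L => (d : Int) + 2 * pvInt2 L

-- the L-bit window of v starting at bit j (two's complement window, always in [0, 2^L))
def pvWnd (v : Int) (j L : Nat) : Int := v / 2^j % 2^L

theorem nat_and_add_or (a b : Nat) : (a &&& b) + (a ||| b) = a + b := by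
  induction a using Nat.binaryRec generalizing b with
  | zero => simp
  | bit ba a' ih =>
    induction b using Nat.binaryRec with
    | zero => simp
    | bit bb b' _ =>
      rw [Nat.land_bit, Nat.lor_bit, Nat.bit_val, Nat.bit_val, Nat.bit_val, Nat.bit_val]
      have := ih b'
      cases ba <;> cases bb <;> simp <;> omega

theorem nat_and_window (n j L : Nat) :
    n &&& ((2^L - 1) * 2^j) = (n / 2^j % 2^L) * 2^j := by
  have h1 : (2^L - 1) * 2^j = (2^L - 1) <<< j := (Nat.shiftLeft_eq _ _).symm
  have h2 : (n / 2^j % 2^L) * 2^j = ((n >>> j) &&& (2^L - 1)) <<< j := by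
    rw [Nat.shiftLeft_eq, Nat.and_two_pow_sub_one_eq_mod, Nat.shiftRight_eq_div_pow]
  rw [h1, h2]
  apply Nat.eq_of_testBit_eq
  intro i
  simp only [Nat.testBit_and, Nat.testBit_shiftLeft, Nat.testBit_shiftRight,
    Nat.testBit_two_pow_sub_one]
  by_cases hij : j ≤ i
  · have e : j + (i - j) = i := by omega
    rw [e]
    by_cases hL : i - j < L <;> simp [hij, hL, Bool.and_comm]
  · simp [hij]

theorem nat_and_mul_pow_eq_zero (a n j L : Nat) (hn : n < 2^L)
    (h : a / 2^j % 2^L = 0) : a &&& (n * 2^j) = 0 := by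
  apply Nat.eq_of_testBit_eq
  intro i
  rw [← Nat.shiftLeft_eq]
  simp only [Nat.testBit_and, Nat.testBit_shiftLeft, Nat.zero_testBit]
  by_cases hij : j ≤ i
  · by_cases hL : i - j < L
    · have ha : a.testBit i = false := by
        have e : i - j + j = i := by omega
        have h2 := congrArg (fun x => Nat.testBit x (i - j)) h
        simp only [Nat.testBit_mod_two_pow, Nat.testBit_div_two_pow, hL, decide_true,
          Bool.true_and, e, Nat.zero_testBit] at h2
        exact h2
      simp [ha]
    · have hb : n.testBit (i - j) = false :=
        Nat.testBit_eq_false_of_lt (lt_of_lt_of_le hn (Nat.pow_le_pow_right (by norm_num) (by omega)))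
      simp [hb]
  · simp [hij]

theorem nat_and_mul_pow_eq_self (m n j L : Nat) (hn : n < 2^L)
    (h : m / 2^j % 2^L = 2^L - 1) : m &&& (n * 2^j) = n * 2^j := by
  apply Nat.eq_of_testBit_eq
  intro i
  rw [← Nat.shiftLeft_eq]
  simp only [Nat.testBit_and, Nat.testBit_shiftLeft]
  by_cases hij : j ≤ i
  · by_cases hL : i - j < L
    · have hm : m.testBit i = true := by
        have e : i - j + j = i := by omega
        have h2 := congrArg (fun x => Nat.testBit x (i - j)) h
        simp only [Nat.testBit_mod_two_pow, Nat.testBit_div_two_pow, hL, decide_true,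
          Bool.true_and, e, Nat.testBit_two_pow_sub_one] at h2
        exact h2
      simp [hm]
    · have hb : n.testBit (i - j) = false :=
        Nat.testBit_eq_false_of_lt (lt_of_lt_of_le hn (Nat.pow_le_pow_right (by norm_num) (by omega)))
      simp [hb]
  · simp [hij]

theorem int_not_eq (a : Int) : Int.not a = -a - 1 := by
  cases a <;> simp [Int.not, Int.negSucc_eq] <;> omega

theorem pvWnd_natCast (n : Nat) (j L : Nat) :
    pvWnd (↑n) j L = ((n / 2^j % 2^L : Nat) : Int) := by
  unfold pvWnd; push_cast; ring

theorem pvWnd_negSucc (m : Nat) (j L : Nat) :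
    pvWnd (Int.negSucc m) j L = 2^L - 1 - ((m / 2^j % 2^L : Nat) : Int) := by
  unfold pvWnd
  have h1 : Int.negSucc m / 2^j = Int.negSucc (m / 2^j) := by
    rw [Int.negSucc_ediv _ (by positivity)]
    rw [Int.negSucc_eq]
    congr 1
  rw [h1, Int.negSucc_emod _ (by positivity)]
  push_cast
  ring

-- set one bit
theorem int_setbit (v : Int) (k : Nat) :
    PySem.Int.bor v ((1 : Int) <<< k) = v + (1 - pvWnd v k 1) * 2^k := by
  have hsym : ((1 : Int) <<< k) = (((2^k : Nat)) : Int) := by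
    rw [Int.shiftLeft_eq, one_mul]; push_cast; ring
  have hw1 : ∀ n : Nat, n &&& 2^k = (n / 2^k % 2) * 2^k := by
    intro n
    have := nat_and_window n k 1
    simpa using this
  cases v with
  | ofNat n =>
    rw [hsym, show Int.ofNat n = ((n : Nat) : Int) from rfl,
      PySem.Int.bor_of_nonneg (by positivity) (by positivity)]
    simp only [Int.toNat_natCast]
    have hao := nat_and_add_or n (2^k)
    have hand := hw1 n
    have hle : n / 2^k % 2 * 2^k ≤ n :=
      le_trans (Nat.mul_le_mul_right _ (Nat.mod_le _ _)) (Nat.div_mul_le_self n _)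
    have hor : n ||| 2^k = n + 2^k - n / 2^k % 2 * 2^k := by omega
    rw [hor, pvWnd_natCast]
    have h2 : ((2:Nat)^1 : Nat) = 2 := by norm_num
    push_cast [Nat.sub_le_iff_le_add.mpr (by omega : n + 2^k - n / 2^k % 2 * 2^k ≤ n + 2^k)]
    rw [Nat.cast_sub (by omega)]
    push_cast
    ring
  | negSucc m =>
    have hneg : ¬ (0 : Int) ≤ Int.negSucc m := by
      rw [Int.negSucc_eq]; omega
    rw [hsym]
    unfold PySem.Int.bor
    rw [if_neg hneg, if_pos (by positivity)]
    have hv : -(Int.negSucc m) - 1 = (m : Int) := by rw [Int.negSucc_eq]; ring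
    rw [hv]
    simp only [Int.toNat_natCast]
    have hand := hw1 m
    have hle : m &&& 2^k ≤ m := Nat.and_le_left
    rw [hand] at hle
    rw [hand, pvWnd_negSucc]
    rw [Nat.cast_sub hle]
    rw [Int.negSucc_eq]
    push_cast
    ring

-- clear an L-bit window starting at bit j   (matches the Int.not (mask <<< j) shape of the ports)
theorem int_clrwnd (v : Int) (j L : Nat) :
    PySem.Int.band v (Int.not (((1 : Int) <<< L - 1) <<< j)) = v - pvWnd v j L * 2^j := by
  have hM : ((1 : Int) <<< L - 1) <<< j = (((2^L - 1) * 2^j : Nat) : Int) := by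
    rw [Int.shiftLeft_eq, Int.shiftLeft_eq, one_mul]
    have h1 : (1:Nat) ≤ 2^L := Nat.one_le_two_pow
    push_cast [h1]
    ring
  rw [hM, int_not_eq]
  have hMnn : (0 : Int) ≤ (((2^L - 1) * 2^j : Nat) : Int) := by positivity
  cases v with
  | ofNat n =>
    unfold PySem.Int.band
    rw [if_pos (show (0:Int) ≤ Int.ofNat n from Int.natCast_nonneg n), if_neg (by omega)]
    have hb : -(-(((2^L - 1) * 2^j : Nat) : Int) - 1) - 1 = (((2^L - 1) * 2^j : Nat) : Int) := by ring
    rw [hb]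
    simp only [Int.toNat_natCast]
    show ((n - (n &&& (2^L - 1) * 2^j) : Nat) : Int) = Int.ofNat n - pvWnd (Int.ofNat n) j L * 2^j
    rw [nat_and_window]
    have hle : n / 2^j % 2^L * 2^j ≤ n :=
      le_trans (Nat.mul_le_mul_right _ (Nat.mod_le _ _)) (Nat.div_mul_le_self n _)
    rw [Nat.cast_sub hle, show Int.ofNat n = ((n:Nat) : Int) from rfl, pvWnd_natCast]
    push_cast
    ring
  | negSucc m =>
    have hneg : ¬ (0 : Int) ≤ Int.negSucc m := by rw [Int.negSucc_eq]; omega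
    unfold PySem.Int.band
    rw [if_neg hneg, if_neg (by omega)]
    have hv : -(Int.negSucc m) - 1 = (m : Int) := by rw [Int.negSucc_eq]; ring
    have hb : -(-(((2^L - 1) * 2^j : Nat) : Int) - 1) - 1 = (((2^L - 1) * 2^j : Nat) : Int) := by ring
    rw [hv, hb]
    simp only [Int.toNat_natCast]
    have hao := nat_and_add_or m ((2^L - 1) * 2^j)
    have hand := nat_and_window m j L
    have hwle : m / 2^j % 2^L ≤ 2^L - 1 := by
      have := Nat.mod_lt (m / 2^j) (show 0 < 2^L by positivity); omega
    have hor : m ||| (2^L - 1) * 2^j = m + (2^L - 1) * 2^j - m / 2^j % 2^L * 2^j := by omega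
    rw [hor, pvWnd_negSucc]
    have h1 : (1:Nat) ≤ 2^L := Nat.one_le_two_pow
    rw [Nat.cast_sub (by nlinarith [Nat.mul_le_mul_right (2^j) hwle] :
      m / 2^j % 2^L * 2^j ≤ m + (2^L - 1) * 2^j)]
    rw [Int.negSucc_eq]
    push_cast [h1]
    ring

-- OR a value into a zeroed window
theorem int_orwnd (w : Int) (n j L : Nat) (hn : n < 2^L) (hw : pvWnd w j L = 0) :
    PySem.Int.bor w ((n : Int) * 2^j) = w + (n : Int) * 2^j := by
  have hb : ((n : Int) * 2^j) = ((n * 2^j : Nat) : Int) := by push_cast; ring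
  cases w with
  | ofNat a =>
    rw [hb, show Int.ofNat a = ((a:Nat) : Int) from rfl,
      PySem.Int.bor_of_nonneg (by positivity) (by positivity)]
    simp only [Int.toNat_natCast]
    have hz : a / 2^j % 2^L = 0 := by
      rw [show Int.ofNat a = ((a : Nat) : Int) from rfl, pvWnd_natCast] at hw
      exact_mod_cast hw
    have hao := nat_and_add_or a (n * 2^j)
    have hand := nat_and_mul_pow_eq_zero a n j L hn hz
    have hor : a ||| n * 2^j = a + n * 2^j := by omega
    rw [hor]; push_cast; ring
  | negSucc m =>
    have hneg : ¬ (0 : Int) ≤ Int.negSucc m := by rw [Int.negSucc_eq]; omega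
    rw [hb]
    unfold PySem.Int.bor
    rw [if_neg hneg, if_pos (by positivity)]
    have hv : -(Int.negSucc m) - 1 = (m : Int) := by rw [Int.negSucc_eq]; ring
    rw [hv]
    simp only [Int.toNat_natCast]
    have hfull : m / 2^j % 2^L = 2^L - 1 := by
      rw [pvWnd_negSucc] at hw
      have h1 : (1:Nat) ≤ 2^L := Nat.one_le_two_pow
      have hcast : ((m / 2^j % 2^L : Nat) : Int) = 2^L - 1 := by omega
      have hx : ((2:Int)^L - 1) = ((2^L - 1 : Nat) : Int) := by
        rw [Nat.cast_sub h1]; push_cast; ring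
      rw [hx] at hcast
      exact_mod_cast hcast
    have hand := nat_and_mul_pow_eq_self m n j L hn hfull
    have hle : n * 2^j ≤ m := by rw [← hand]; exact Nat.and_le_left
    rw [hand, Nat.cast_sub hle, Int.negSucc_eq]
    push_cast
    ring

theorem int_clrbit (v : Int) (k : Nat) :
    PySem.Int.band v (Int.not ((1 : Int) <<< k)) = v - pvWnd v k 1 * 2^k := by
  have e : ((1 : Int) <<< (1:Nat) - 1) = 1 := by decide
  have := int_clrwnd v k 1
  rwa [e] at this

-- the window splits into its low bit and the rest
theorem pvWnd_succ (v : Int) (k len : Nat) :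
    pvWnd v k (len + 1) = pvWnd v k 1 + 2 * pvWnd v (k + 1) len := by
  have hx : v / 2^(k+1) = (v / 2^k) / 2 := by
    rw [pow_succ]
    exact (Int.ediv_ediv_eq_ediv_mul (by positivity)).symm
  unfold pvWnd
  rw [hx, pow_one]
  set x := v / 2^k with hxdef
  have hm : (0:Int) < 2^len := by positivity
  have h2 : (2:Int) * (x / 2) + x % 2 = x := by
    have := Int.ediv_add_emod x 2; omega
  have hq : (2:Int)^len * ((x/2) / 2^len) + (x/2) % 2^len = x/2 := Int.ediv_add_emod _ _
  have hr0 : (0:Int) ≤ x % 2 := Int.emod_nonneg _ (by norm_num)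
  have hr1 : x % 2 < 2 := Int.emod_lt_of_pos _ (by norm_num)
  have hw0 : (0:Int) ≤ (x/2) % 2^len := Int.emod_nonneg _ (by positivity)
  have hw1 : (x/2) % 2^len < 2^len := Int.emod_lt_of_pos _ hm
  have hdecomp : x = (x % 2 + 2 * ((x/2) % 2^len)) + ((x/2)/2^len) * 2^(len+1) := by
    rw [pow_succ]
    nlinarith [h2, hq]
  calc x % 2^(len+1)
      = ((x % 2 + 2 * ((x/2) % 2^len)) + ((x/2)/2^len) * 2^(len+1)) % 2^(len+1) := by rw [← hdecomp]
    _ = (x % 2 + 2 * ((x/2) % 2^len)) % 2^(len+1) := by rw [Int.add_mul_emod_self_right]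
    _ = x % 2 + 2 * ((x/2) % 2^len) := by
        apply Int.emod_eq_of_lt (by omega)
        rw [pow_succ]; omega

theorem pvWnd_one (v : Int) (k : Nat) : pvWnd v k 1 = v / 2^k % 2 := by
  unfold pvWnd; norm_num

-- writing one bit at position k does not change the quotient by 2^(k+1)
theorem int_ediv_step (v : Int) (k : Nat) (d : Int) (h0 : 0 ≤ d) (h1 : d ≤ 1) :
    (v + (d - pvWnd v k 1) * 2^k) / 2^(k+1) = v / 2^(k+1) := by
  set p : Int := 2^k with hp
  have hppos : (0:Int) < p := by positivity
  have hP : (2:Int)^(k+1) = 2*p := by rw [hp, pow_succ]; ring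
  have hv : 2*p*(v/(2*p)) + v%(2*p) = v := Int.ediv_add_emod _ _
  set q := v/(2*p) with hq
  set r := v%(2*p) with hr
  have hr0 : (0:Int) ≤ r := Int.emod_nonneg _ (by positivity)
  have hr2 : r < 2*p := Int.emod_lt_of_pos _ (by positivity)
  have hrdec : p*(r/p) + r%p = r := Int.ediv_add_emod _ _
  have hrp0 : (0:Int) ≤ r % p := Int.emod_nonneg _ (by omega)
  have hrpp : r % p < p := Int.emod_lt_of_pos _ hppos
  have hb0 : (0:Int) ≤ r/p := Int.ediv_nonneg hr0 (le_of_lt hppos)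
  have hb1 : r/p < 2 := by rw [Int.ediv_lt_iff_lt_mul hppos]; omega
  have hwnd : pvWnd v k 1 = r / p := by
    rw [pvWnd_one, ← hp]
    have hv' : v = r + (2*q)*p := by rw [← hv]; ring
    rw [hv', Int.add_mul_ediv_right _ _ (ne_of_gt hppos)]
    rw [show r/p + 2*q = r/p + q*2 by ring, Int.add_mul_emod_self_right]
    exact Int.emod_eq_of_lt hb0 hb1
  have key : v + (d - pvWnd v k 1) * p = (r%p + d*p) + q*(2*p) := by
    rw [hwnd]
    have hv2 : v = 2*p*q + (p*(r/p) + r%p) := by rw [hrdec, hv]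
    rw [hv2]; ring
  rw [hP, key, Int.add_mul_ediv_right _ _ (by positivity : (2:Int)*p ≠ 0)]
  have hz : (r%p + d*p) / (2*p) = 0 := by
    apply Int.ediv_eq_zero_of_lt
    · nlinarith
    · nlinarith
  rw [hz, zero_add]

-- after clearing the window, the window is zero
theorem pvWnd_clr (v : Int) (j L : Nat) :
    pvWnd (v - pvWnd v j L * 2^j) j L = 0 := by
  unfold pvWnd
  have hp : (0:Int) < 2^j := by positivity
  have h1 : (v - (v / 2^j % 2^L) * 2^j) / 2^j = v / 2^j - v / 2^j % 2^L := by
    rw [sub_eq_add_neg, show -((v / 2^j % 2^L) * 2^j) = (-(v / 2^j % 2^L)) * 2^j by ring,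
      Int.add_mul_ediv_right _ _ (ne_of_gt hp)]
    ring
  rw [h1, Int.sub_emod, Int.emod_emod_of_dvd _ dvd_rfl, sub_self, Int.zero_emod]

-- ==== digits of pyBinRev ====

theorem pyBinRev_le (n : Nat) : ∀ d ∈ pyBinRev n, d ≤ 1 := by
  induction n using Nat.strong_induction_on with
  | _ n ih =>
    rw [pyBinRev]
    split
    · simp
    · intro d hd
      rcases List.mem_cons.mp hd with h | h
      · omega
      · exact ih (n / 2) (Nat.div_lt_self (by omega) one_lt_two) d h

theorem pyBinRev_int2 (n : Nat) : pvInt2 (pyBinRev n) = (n : Int) := by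
  induction n using Nat.strong_induction_on with
  | _ n ih =>
    rw [pyBinRev]
    split
    · simp [pvInt2]; omega
    · rw [show pvInt2 (n % 2 :: pyBinRev (n / 2)) = ((n % 2 : Nat) : Int) + 2 * pvInt2 (pyBinRev (n / 2)) from rfl]
      rw [ih (n / 2) (Nat.div_lt_self (by omega) one_lt_two)]
      push_cast
      omega

theorem pyBinRev_len (n : Nat) : (pyBinRev n).length = PySem.Int.bitLength (n : Int) := by
  induction n using Nat.strong_induction_on with
  | _ n ih =>
    rw [pyBinRev]
    split
    · rename_i h; subst h; simp [PySem.Int.bitLength_zero]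
    · rename_i h
      rw [List.length_cons, ih (n / 2) (Nat.div_lt_self (by omega) one_lt_two)]
      rw [PySem.Int.bitLength_natCast (by omega : 0 < n)]

theorem bitLength_pos (n : Nat) (h : 0 < n) : 1 ≤ PySem.Int.bitLength (n : Int) := by
  rw [PySem.Int.bitLength_natCast h]; omega

-- ==== characterization of A's loop ====

theorem foldA (index : Int) (hidx : 0 ≤ index) (L : List Nat) :
    ∀ (s : Int), 0 ≤ s → ∀ (v : Int), (∀ d ∈ L, d ≤ 1) →
    List.foldl
      (fun v p =>
        if p.2 = 1 then PySem.Int.bor v ((1 : Int) <<< (index + p.1).toNat)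
        else PySem.Int.band v (Int.not ((1 : Int) <<< (index + p.1).toNat)))
      v (PySem.List.enumerate L s)
    = v + (pvInt2 L - pvWnd v (index + s).toNat L.length) * 2^((index + s).toNat) := by
  induction L with
  | nil =>
    intro s hs v _
    simp [PySem.List.enumerate_nil, pvInt2, pvWnd, Int.emod_one]
  | cons d L ih =>
    intro s hs v h1
    rw [PySem.List.enumerate_cons, List.foldl_cons]
    have hd1 : d ≤ 1 := h1 d (by simp)
    set k := (index + s).toNat with hk
    have hks : (index + (s + 1)).toNat = k + 1 := by omega
    have step :
        (if d = 1 then PySem.Int.bor v ((1 : Int) <<< k)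
         else PySem.Int.band v (Int.not ((1 : Int) <<< k)))
        = v + ((d : Int) - pvWnd v k 1) * 2^k := by
      by_cases hd : d = 1
      · rw [if_pos hd, int_setbit, hd]; norm_num
      · have hd0 : d = 0 := by omega
        rw [if_neg hd, int_clrbit, hd0]
        push_cast
        ring
    show List.foldl _
        (if d = 1 then PySem.Int.bor v ((1 : Int) <<< (index + s).toNat)
         else PySem.Int.band v (Int.not ((1 : Int) <<< (index + s).toNat)))
        (PySem.List.enumerate L (s + 1)) = _
    rw [← hk, step, ih (s + 1) (by omega) _ (fun d hd => h1 d (List.mem_cons_of_mem _ hd)), hks]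
    have hwnd : pvWnd (v + ((d : Int) - pvWnd v k 1) * 2^k) (k+1) L.length
        = pvWnd v (k+1) L.length := by
      show (v + ((d : Int) - pvWnd v k 1) * 2^k) / 2^(k+1) % 2^L.length
          = v / 2^(k+1) % 2^L.length
      rw [int_ediv_step v k (d : Int) (by positivity) (by exact_mod_cast hd1)]
    rw [hwnd]
    rw [show pvInt2 (d :: L) = ((d : Nat) : Int) + 2 * pvInt2 L from rfl]
    rw [List.length_cons, pvWnd_succ v k L.length]
    rw [pow_succ]
    ring

-- ==== characterization of B ====

theorem altChar (v n i : Int) (hn : 0 ≤ n) (hi : 0 ≤ i) :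
    set_bits_alt v n i
      = v + (n - pvWnd v i.toNat (max (PySem.Int.bitLength n) 1)) * 2^i.toNat := by
  simp only [set_bits_alt]
  set L := max (PySem.Int.bitLength n) 1 with hL
  set j := i.toNat with hj
  rw [int_clrwnd v j L]
  have hsh : n <<< j = ((n.toNat : Nat) : Int) * 2^j := by
    rw [Int.shiftLeft_eq, Int.toNat_of_nonneg hn]
  rw [hsh]
  have hlt : n.toNat < 2^L := by
    have h1 : n.natAbs < 2^(PySem.Int.bitLength n) := PySem.Int.lt_two_pow_bitLength n
    have h2 : (2:Nat)^(PySem.Int.bitLength n) ≤ 2^L :=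
      Nat.pow_le_pow_right (by norm_num) (le_max_left _ _)
    have h3 : n.natAbs = n.toNat := by omega
    omega
  rw [int_orwnd _ n.toNat j L hlt (pvWnd_clr v j L)]
  rw [Int.toNat_of_nonneg hn]
  ring

-- ==== main ====

theorem set_bits_spec : Claim_equal_set_bits := by
  intro v n i _ hpre
  obtain ⟨hn, hi⟩ := hpre
  unfold Spec_set_bits
  unfold set_bits
  set bits : List Nat := if n = 0 then [0] else pyBinRev n.toNat with hbits
  have hle : ∀ d ∈ bits, d ≤ 1 := by
    rw [hbits]; split
    · simp
    · exact pyBinRev_le n.toNat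
  have hval : pvInt2 bits = n := by
    rw [hbits]; split
    · rename_i h; subst h; simp [pvInt2]
    · rw [pyBinRev_int2, Int.toNat_of_nonneg hn]
  have hlen : bits.length = max (PySem.Int.bitLength n) 1 := by
    rw [hbits]; split
    · rename_i h; subst h; simp [PySem.Int.bitLength_zero]
    · rename_i h
      rw [pyBinRev_len, Int.toNat_of_nonneg hn]
      have hpos : 0 < n.toNat := by omega
      have := bitLength_pos n.toNat hpos
      rw [Int.toNat_of_nonneg hn] at this
      omega
  have h0 := foldA i hi bits 0 (le_refl 0) v hle
  rw [add_zero] at h0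
  rw [h0, hval, hlen, altChar v n i hn hi]

-- ===== VERDICT =====
-- (theorem set_bits_spec above proves Claim_equal_set_bits)
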